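-- pv_equiv track=rewrite | github.com/ArturBieniek4/University | [2023 zima] WDPP - Wstęp do programowania w języku Python/lista11/2.py | ppn
-- ===== SOURCE A (Python) =====
-- def ppn(slowo):
--     litery=dict.fromkeys(slowo)
--     i=1
--     for litera in litery:
--         litery[litera]=i
--         i+=1
--     ans=[]
--     for litera in slowo:
--         ans.append(str(litery[litera]))
--     return "-".join(ans)
-- ===== SOURCE B (Python) =====
-- def ppn(slowo):
--     # The number of a letter is the count of distinct letters in the prefix of
--     # slowo that ends at that letter's first occurrence: no dict, no numbering pass.
--     litery = list(slowo)
--     return "-".join(str(len(set(litery[:litery.index(ch) + 1]))) for ch in litery)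
-- ===== Notes on version B (the rewrite author's own statement) =====
-- stated objective: alternative
-- what changed: B drops the dict entirely: each letter's number is computed as the count of distinct letters in the prefix of the word ending at that letter's first occurrence (len(set(prefix))), a per-character closed form instead of A's staged dict-numbering passes.
import Mathlib
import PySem

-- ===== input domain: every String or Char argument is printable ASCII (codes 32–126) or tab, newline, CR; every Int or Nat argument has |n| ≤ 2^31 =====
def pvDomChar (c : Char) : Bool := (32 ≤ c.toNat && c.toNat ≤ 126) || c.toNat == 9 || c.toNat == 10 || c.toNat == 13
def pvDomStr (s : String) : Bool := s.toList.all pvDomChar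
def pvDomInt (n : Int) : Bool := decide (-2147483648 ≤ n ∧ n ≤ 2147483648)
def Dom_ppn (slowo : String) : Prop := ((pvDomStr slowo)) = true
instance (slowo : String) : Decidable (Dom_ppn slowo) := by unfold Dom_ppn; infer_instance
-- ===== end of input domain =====

-- B drops the dict: each letter's number is the count of distinct letters in the
-- prefix ending at its first occurrence; objective: alternative (same result, no dict).

-- ===== PORT A =====
def ppn (slowo : String) : String :=
  -- litery = dict.fromkeys(slowo): its keys, in first-occurrence order (the None values
  -- are all overwritten by the numbering loop before any read)
  let keys := PySem.List.dedup slowo.toList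
  -- for litera in litery: litery[litera] = i; i += 1
  let litery := (keys.foldl
      (fun (st : PySem.Dict Char Int × Int) litera => (st.1.insert litera st.2, st.2 + 1))
      (PySem.Dict.empty, 1)).1
  -- ans = []; for litera in slowo: ans.append(str(litery[litera]))
  let ans := slowo.toList.foldl
      (fun a litera => a ++ [match PySem.Dict.get? litery litera with
        | some n => PySem.Int.toStr n
        | none => ""])  -- none = KeyError: unreachable, every char of slowo is a key of litery
      []
  PySem.Str.join "-" ans

-- ===== PORT B =====
def ppn_alt (slowo : String) : String :=
  -- litery = list(slowo)
  let litery := slowo.toList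
  -- "-".join(str(len(set(litery[:litery.index(ch) + 1]))) for ch in litery)
  PySem.Str.join "-" (litery.map (fun ch =>
    PySem.Int.toStr (PySem.Set.len (PySem.Set.ofList
      (PySem.List.slice litery none
        -- litery.index(ch): ValueError impossible, ch is drawn from litery
        (some (((PySem.List.index? litery ch).getD 0 : Int) + 1)))))))

-- ===== PRECONDITION & SPEC =====
def Spec_ppn (slowo : String) (out : String) : Prop := out = ppn_alt slowo
instance (slowo : String) (out : String) : Decidable (Spec_ppn slowo out) := by unfold Spec_ppn; infer_instance

-- ===== CLAIM (what is proved, stated in full; the proofs are below) =====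
def Claim_equal_ppn : Prop := ∀ (slowo : String), Dom_ppn slowo → Spec_ppn slowo (ppn slowo)

-- ===== LEMMAS AND PROOFS =====

-- PySem.Set.update only appends: the old set is a prefix.
theorem pv_update_append (s : List Char) (l : List Char) :
    ∃ t, PySem.Set.update s l = s ++ t := by
  induction l generalizing s with
  | nil => exact ⟨[], by simp [PySem.Set.update]⟩
  | cons c l ih =>
    have : PySem.Set.update s (c :: l) = PySem.Set.update (PySem.Set.add s c) l := rfl
    rw [this]
    rcases ih (PySem.Set.add s c) with ⟨t, ht⟩
    by_cases h : c ∈ s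
    · have hadd : PySem.Set.add s c = s := by simp [PySem.Set.add, PySem.Set.contains, h]
      rw [hadd] at ht
      exact ⟨t, by rw [hadd]; exact ht⟩
    · have hadd : PySem.Set.add s c = s ++ [c] := by simp [PySem.Set.add, PySem.Set.contains, h]
      rw [hadd] at ht
      exact ⟨c :: t, by rw [hadd, ht]; simp⟩

-- A's numbering loop: key j of ks (nodup) gets value i + j.
theorem pv_number_loop (ks : List Char) (d : PySem.Dict Char Int) (i : Int)
    (hnd : ks.Nodup) (c : Char) :
    ((ks.foldl (fun (st : PySem.Dict Char Int × Int) k => (st.1.insert k st.2, st.2 + 1)) (d, i)).1).get? c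
      = if c ∈ ks then some (i + (List.idxOf c ks : Int)) else d.get? c := by
  induction ks generalizing d i with
  | nil => simp
  | cons k t ih =>
    simp only [List.foldl_cons, List.nodup_cons] at *
    rw [ih _ _ hnd.2]
    by_cases hc : c ∈ t
    · have hck : c ≠ k := fun h => hnd.1 (h ▸ hc)
      simp only [hc, List.mem_cons, hck, or_true, if_true,
        List.idxOf_cons_ne _ (Ne.symm hck), Nat.succ_eq_add_one]
      congr 1
      push_cast
      ring
    · by_cases hck : c = k
      · subst hck
        simp [hc, PySem.Dict.get?_insert_self, List.idxOf_cons_self]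
      · simp [hc, hck, PySem.Dict.get?_insert_of_ne _ _ hck]

-- B's closed form with an accumulated seen-set: for c not yet seen, the distinct count
-- of the prefix ending at c's first occurrence equals c's rank in the final seen order.
theorem pv_prefix_rank (l : List Char) (s : List Char) (c : Char)
    (hc : c ∈ l) (hs : c ∉ s) :
    (PySem.Set.update s (l.take (List.idxOf c l + 1))).length
      = List.idxOf c (PySem.Set.update s l) + 1 := by
  induction l generalizing s with
  | nil => cases hc
  | cons a t ih =>
    by_cases hca : c = a
    · subst hca
      have hadd : PySem.Set.add s c = s ++ [c] := by
        simp [PySem.Set.add, PySem.Set.contains, hs]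
      have h1 : PySem.Set.update s ((c :: t).take (List.idxOf c (c :: t) + 1))
          = s ++ [c] := by
        simp [List.idxOf_cons_self, PySem.Set.update, hadd]
      rw [h1]
      have h2 : PySem.Set.update s (c :: t) = PySem.Set.update (s ++ [c]) t := by
        show PySem.Set.update (PySem.Set.add s c) t = _
        rw [hadd]
      rcases pv_update_append (s ++ [c]) t with ⟨u, hu⟩
      rw [h2, hu, List.append_assoc, List.idxOf_append_of_notMem hs]
      simp
    · have hct : c ∈ t := by
        rcases List.mem_cons.1 hc with h | h
        · exact absurd h hca
        · exact h
      have hidx : List.idxOf c (a :: t) = List.idxOf c t + 1 :=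
        List.idxOf_cons_ne _ (Ne.symm hca)
      have htake : (a :: t).take (List.idxOf c (a :: t) + 1)
          = a :: t.take (List.idxOf c t + 1) := by
        rw [hidx]; rfl
      rw [htake]
      have hstep : ∀ (x : List Char), PySem.Set.update s (a :: x)
          = PySem.Set.update (PySem.Set.add s a) x := fun _ => rfl
      rw [hstep, hstep]
      have hcs : c ∉ PySem.Set.add s a := by
        simp only [PySem.Set.add, PySem.Set.contains]
        split_ifs with h
        · exact hs
        · simp [hs, hca]
      exact ih (PySem.Set.add s a) hct hcs

-- list.index of a present element is its idxOf.
theorem pv_index_mem (l : List Char) (c : Char) (hc : c ∈ l) :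
    (PySem.List.index? l c).getD 0 = List.idxOf c l := by
  induction l with
  | nil => cases hc
  | cons a t ih =>
    by_cases h : a = c
    · subst h
      rw [PySem.List.index?_cons_self]
      simp [List.idxOf_cons_self]
    · have hct : c ∈ t := by
        rcases List.mem_cons.1 hc with h' | h'
        · exact absurd h'.symm h
        · exact h'
      have hsome : (PySem.List.index? t c).isSome := (PySem.List.index?_isSome_iff t c).2 hct
      rcases Option.isSome_iff_exists.1 hsome with ⟨k, hk⟩
      have := ih hct
      rw [hk] at this
      rw [PySem.List.index?_cons_of_ne _ h, hk, List.idxOf_cons_ne _ h]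
      simp only [Option.map_some, Option.getD_some] at *
      omega

-- ===== VERDICT (by name: the statement is the Claim_ definition above) =====
theorem ppn_spec : Claim_equal_ppn := by
  intro slowo _
  unfold Spec_ppn ppn ppn_alt
  simp only
  rw [PySem.List.foldl_append_singleton_eq_map]
  have hnd : (PySem.List.dedup slowo.toList).Nodup := PySem.List.nodup_dedup _
  apply congrArg
  apply List.map_congr_left
  intro c hc
  have hcd : c ∈ PySem.List.dedup slowo.toList := by
    simpa [PySem.List.mem_dedup] using hc
  rw [pv_number_loop _ _ _ hnd c, if_pos hcd]
  -- B side: turn the slice bound into a take of the prefix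
  rw [pv_index_mem _ _ hc]
  have hb : ((List.idxOf c slowo.toList : Int) + 1)
      = ((List.idxOf c slowo.toList + 1 : Nat) : Int) := by push_cast; ring
  rw [hb, PySem.List.slice_to_natCast]
  have hrank := pv_prefix_rank slowo.toList [] c hc (by simp)
  have hupd : PySem.Set.update ([] : List Char) slowo.toList
      = PySem.List.dedup slowo.toList := by
    simp [PySem.List.dedup_eq_ofList, PySem.Set.ofList_eq_foldl, PySem.Set.update]
  have hof : PySem.Set.ofList (slowo.toList.take (List.idxOf c slowo.toList + 1))
      = PySem.Set.update ([] : List Char) (slowo.toList.take (List.idxOf c slowo.toList + 1)) := by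
    simp [PySem.Set.ofList_eq_foldl, PySem.Set.update]
  rw [hupd] at hrank
  simp only [PySem.Set.len, hof, hrank]
  congr 1
  push_cast
  ring
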